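-- pv_equiv track=rewrite | github.com/deepakrakshit/jarvis | services/document/fast_reasoning.py | query_needs_visual_reasoning
-- ===== SOURCE A (Python) =====
-- def query_needs_visual_reasoning(query: str) -> bool:
--     lowered = str(query or "").strip().lower()
--     if not lowered:
--         return False
--
--     visual_tokens = (
--         "image",
--         "images",
--         "layout",
--         "diagram",
--         "figure",
--         "chart",
--         "graph",
--         "screenshot",
--         "stamp",
--         "signature",
--         "visual",
--         "table",
--         "tables",
--     )
--     return any(token in lowered for token in visual_tokens)
-- ===== SOURCE B (Python) =====
-- def query_needs_visual_reasoning(query: str) -> bool: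
--     lowered = str(query or "").strip().lower()
--
--     visual_tokens = (
--         "image",
--         "images",
--         "layout",
--         "diagram",
--         "figure",
--         "chart",
--         "graph",
--         "screenshot",
--         "stamp",
--         "signature",
--         "visual",
--         "table",
--         "tables",
--     )
--     # single left-to-right pass: at each position test whether some token starts there
--     for i in range(len(lowered)):
--         rest = lowered[i:]
--         if any(rest.startswith(token) for token in visual_tokens):
--             return True
--     return False
-- ===== Notes on version B (the rewrite author's own statement) =====
-- stated objective: alternative
-- what changed: Replaces thirteen independent substring scans (any(token in lowered ...)) by one left-to-right pass over the string that at each position checks whether any token starts there.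
import Mathlib
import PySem

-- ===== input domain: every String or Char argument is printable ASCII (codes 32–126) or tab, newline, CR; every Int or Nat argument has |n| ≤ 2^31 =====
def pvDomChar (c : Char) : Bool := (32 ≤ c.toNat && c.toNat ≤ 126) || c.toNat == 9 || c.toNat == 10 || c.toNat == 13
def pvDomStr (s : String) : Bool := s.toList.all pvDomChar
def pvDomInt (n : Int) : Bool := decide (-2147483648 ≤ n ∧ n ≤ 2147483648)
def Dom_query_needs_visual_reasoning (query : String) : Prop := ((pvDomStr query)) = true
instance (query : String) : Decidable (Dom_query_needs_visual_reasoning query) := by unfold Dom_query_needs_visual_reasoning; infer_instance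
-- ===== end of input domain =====

-- B differs from A only in traversal: one pass over positions instead of 13 independent substring scans; same tokens, same preprocessing.

def pvVisualTokens : List String :=
  ["image", "images", "layout", "diagram", "figure", "chart", "graph",
   "screenshot", "stamp", "signature", "visual", "table", "tables"]

-- ===== PORT A =====
-- `str(query or "")` is the identity on a str argument; then .strip().lower(), empty check, any(token in lowered ...)
def query_needs_visual_reasoning (query : String) : Bool :=
  let lowered := PySem.Str.lower (PySem.Str.strip query)
  if lowered = "" then false
  else pvVisualTokens.any (fun token => PySem.Str.isIn token lowered)

-- ===== PORT B =====
-- B's loop: for each position i, test whether some token starts at i (recursion over the suffix list)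
def pvScanB (cs : List Char) : Bool :=
  match cs with
  | [] => false
  | c :: rest =>
    if pvVisualTokens.any (fun token => PySem.Chars.startswith (c :: rest) token.toList) then true
    else pvScanB rest

def query_needs_visual_reasoning_alt (query : String) : Bool :=
  let lowered := PySem.Str.lower (PySem.Str.strip query)
  pvScanB lowered.toList

-- ===== PRECONDITION & SPEC =====
def Spec_query_needs_visual_reasoning (query : String) (out : Bool) : Prop := out = query_needs_visual_reasoning_alt query
instance (query : String) (out : Bool) : Decidable (Spec_query_needs_visual_reasoning query out) := by unfold Spec_query_needs_visual_reasoning; infer_instance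

-- ===== CLAIM (what is proved, stated in full; the proofs are below) =====
def Claim_equal_query_needs_visual_reasoning : Prop := ∀ (query : String), Dom_query_needs_visual_reasoning query → Spec_query_needs_visual_reasoning query (query_needs_visual_reasoning query)

-- ===== LEMMAS AND PROOFS =====

-- the one-pass scan equals "some token is an infix", provided every token is nonempty
theorem pvScanB_eq_any (cs : List Char)
    (h : ∀ t ∈ pvVisualTokens, t.toList ≠ []) :
    pvScanB cs = pvVisualTokens.any (fun token => PySem.Chars.isIn token.toList cs) := by
  induction cs with
  | nil =>
    simp only [pvScanB]
    symm
    simp only [List.any_eq_false, Bool.not_eq_true, PySem.Chars.isIn_eq_false_iff]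
    intro t ht hinf
    exact h t ht (List.eq_nil_of_infix_nil hinf)
  | cons c rest ih =>
    have hsplit : ∀ (t : String), PySem.Chars.isIn t.toList (c :: rest)
        = (PySem.Chars.startswith (c :: rest) t.toList || PySem.Chars.isIn t.toList rest) := by
      intro t
      rw [Bool.eq_iff_iff]
      simp only [Bool.or_eq_true, PySem.Chars.isIn_iff_infix, PySem.Chars.startswith_iff]
      exact List.infix_cons_iff
    have hcongr : (pvVisualTokens.any fun token => PySem.Chars.isIn token.toList (c :: rest))
        = pvVisualTokens.any (fun token => PySem.Chars.startswith (c :: rest) token.toList || PySem.Chars.isIn token.toList rest) :=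
      PySem.List.any_congr_mem (fun t _ => hsplit t)
    simp only [pvScanB, ih, hcongr]
    by_cases hA : ∃ x ∈ pvVisualTokens, PySem.Chars.startswith (c :: rest) x.toList = true
    · obtain ⟨t, ht, hs⟩ := hA
      rw [if_pos (List.any_eq_true.mpr ⟨t, ht, hs⟩)]
      exact (List.any_eq_true.mpr ⟨t, ht, (by simp [hs])⟩).symm
    · rw [if_neg (by simpa [List.any_eq_true] using hA)]
      rw [Bool.eq_iff_iff]
      simp only [List.any_eq_true, Bool.or_eq_true]
      constructor
      · rintro ⟨t, ht, hi⟩; exact ⟨t, ht, Or.inr hi⟩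
      · rintro ⟨t, ht, hs | hi⟩
        · exact absurd ⟨t, ht, hs⟩ hA
        · exact ⟨t, ht, hi⟩

-- ===== VERDICT (by name: the statement is the Claim_ definition above) =====
theorem query_needs_visual_reasoning_spec : Claim_equal_query_needs_visual_reasoning := by
  intro query _
  unfold Spec_query_needs_visual_reasoning query_needs_visual_reasoning query_needs_visual_reasoning_alt
  have htok : ∀ t ∈ pvVisualTokens, t.toList ≠ [] := by decide
  dsimp only
  rw [pvScanB_eq_any _ htok]
  by_cases he : PySem.Str.lower (PySem.Str.strip query) = ""
  · rw [he]; decide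
  · rw [if_neg he]
    exact PySem.List.any_congr_mem (fun t _ => PySem.Str.isIn_eq t _)
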